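-- pv_equiv track=rewrite | github.com/albidgy/FLIC | utils/downsampling_by_annot.py | get_correct_intron_and_end_pos
-- ===== SOURCE A (Python) =====
-- def split_cigar(cigar_str):
--     l_of_splice_sites = []
--     tmp_val = []
--     for elem in cigar_str:
--         if elem.isdigit():
--             tmp_val.append(elem)
--         else:
--             l_of_splice_sites.append((elem, ''.join(tmp_val)))
--             tmp_val = []
--     return l_of_splice_sites
--
-- def get_correct_intron_and_end_pos(cigar_str, start_coord):
--     counter_nucls = 0
--     pos_of_introns = []
--     l_of_splice_sites = split_cigar(cigar_str)
--
--     for idx in range(len(l_of_splice_sites)):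
--         cigar, n_nucl = l_of_splice_sites[idx]
--         n_nucl = int(n_nucl)
--         if cigar == 'S':
--             if idx == 0 or idx == len(l_of_splice_sites) - 1:
--                 continue
--         elif cigar in 'I':
--             continue
--         elif cigar == 'N':
--             pos_of_introns.append((start_coord + counter_nucls, start_coord + counter_nucls + n_nucl - 1))
--         counter_nucls += n_nucl
--     end_coord = start_coord + counter_nucls
--     return end_coord, pos_of_introns
-- ===== SOURCE B (Python) =====
-- # Two-phase re-implementation: tokenize the CIGAR, place every token at its
-- # absolute coordinate in one prefix pass, then extract introns from the table.
-- def _tokenize(cigar_str):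
--     tokens = []
--     rest = cigar_str
--     while rest:
--         k = 0
--         while k < len(rest) and rest[k].isdigit():
--             k += 1
--         if k == len(rest):
--             break
--         tokens.append((rest[k], rest[:k]))
--         rest = rest[k + 1:]
--     return tokens
--
-- def get_correct_intron_and_end_pos(cigar_str, start_coord):
--     tokens = _tokenize(cigar_str)
--     last = len(tokens) - 1
--     # phase 1: coordinate table — each token with the coordinate where it starts
--     placed = []
--     pos = start_coord
--     for i, (op, num) in enumerate(tokens):
--         placed.append((op, num, pos))
--         if not (op == 'I' or (op == 'S' and (i == 0 or i == last))):
--             pos += int(num)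
--     # phase 2: extract the introns from the table
--     introns = [(p, p + int(num) - 1) for op, num, p in placed if op == 'N']
--     return pos, introns
-- ===== Notes on version B (the rewrite author's own statement) =====
-- stated objective: alternative
-- what changed: A's single fused accumulate-and-detect loop over hand-accumulated digit buffers is replaced by a three-phase decomposition: a peel-off tokenizer, a prefix pass that places every token at its absolute coordinate, and a separate extraction pass that reads the introns off that table.
import Mathlib
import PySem

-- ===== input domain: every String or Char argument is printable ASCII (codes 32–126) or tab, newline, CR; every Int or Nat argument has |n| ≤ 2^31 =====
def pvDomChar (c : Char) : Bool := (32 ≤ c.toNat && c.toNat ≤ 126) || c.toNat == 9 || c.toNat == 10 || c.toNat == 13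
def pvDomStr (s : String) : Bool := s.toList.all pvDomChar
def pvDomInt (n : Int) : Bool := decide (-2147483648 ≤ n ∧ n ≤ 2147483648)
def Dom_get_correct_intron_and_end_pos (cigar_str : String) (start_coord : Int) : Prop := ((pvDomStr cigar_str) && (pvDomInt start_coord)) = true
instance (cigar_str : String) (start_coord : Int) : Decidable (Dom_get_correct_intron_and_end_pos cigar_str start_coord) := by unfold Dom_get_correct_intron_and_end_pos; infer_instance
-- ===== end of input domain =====

-- B rebuilds A's fused accumulate-and-detect loop as tokenize / prefix-coordinate table / intron
-- extraction (objective: alternative decomposition; return value only, no mutation involved).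

-- ===== PORT A =====
-- split_cigar: fold over the characters with (emitted tokens, pending digit chars)
def splitCigarA (cs : List Char) : List (Char × List Char) :=
  (cs.foldl
    (fun (st : List (Char × List Char) × List Char) elem =>
      if PySem.Chars.isdigit elem then (st.1, st.2 ++ [elem])
      else (st.1 ++ [(elem, st.2)], []))
    ([], [])).1

-- loop body of A, on (idx, (cigar, n_nucl)); int(n_nucl) raises ValueError on an empty count —
-- those inputs are excluded by Pre_, the port leaves the state unchanged there
def aBody (last : Int) (start_coord : Int) (st : Int × List (Int × Int))
    (p : Int × (Char × List Char)) : Int × List (Int × Int) :=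
  match PySem.Int.ofChars? p.2.2 with
  | none => st
  | some n =>
    if p.2.1 = 'S' then
      if p.1 = 0 ∨ p.1 = last then st else (st.1 + n, st.2)
    else if p.2.1 = 'I' then st
    else if p.2.1 = 'N' then
      (st.1 + n, st.2 ++ [(start_coord + st.1, start_coord + st.1 + n - 1)])
    else (st.1 + n, st.2)

def get_correct_intron_and_end_pos (cigar_str : String) (start_coord : Int) : Int × (List (Int × Int)) :=
  let sites := splitCigarA cigar_str.toList
  -- for idx in range(len(sites)): sites[idx] (in range, so any pyGetD default is unreachable)
  let st := (PySem.List.pyRange 0 (PySem.List.len sites) 1).foldl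
    (fun st idx => aBody (PySem.List.len sites - 1) start_coord st
        (idx, PySem.List.pyGetD sites idx ('?', []))) (0, [])
  (start_coord + st.1, st.2)

-- ===== PORT B =====
-- B's tokenizer: peel the leading digit run and the operator off the remaining string
def tokenizeB (cs : List Char) : List (Char × List Char) :=
  match hrest : cs.dropWhile PySem.Chars.isdigit with
  | [] => []
  | op :: tl => (op, cs.takeWhile PySem.Chars.isdigit) :: tokenizeB tl
termination_by cs.length
decreasing_by
  have h1 : (cs.dropWhile PySem.Chars.isdigit).length ≤ cs.length := List.length_dropWhile_le _ _
  rw [hrest] at h1; simp at h1; omega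

-- phase-1 body: append the token with its coordinate, advance pos by its consumed length
def bBody (last : Int) (st : List (Char × List Char × Int) × Int)
    (p : Int × (Char × List Char)) : List (Char × List Char × Int) × Int :=
  let placed := st.1 ++ [(p.2.1, p.2.2, st.2)]
  if ¬(p.2.1 = 'I' ∨ (p.2.1 = 'S' ∧ (p.1 = 0 ∨ p.1 = last))) then
    -- int(num) raises on an empty count (outside Pre_); the port adds 0 there
    (placed, st.2 + (PySem.Int.ofChars? p.2.2).getD 0)
  else (placed, st.2)

-- phase-2: extract introns; int(num) raises outside Pre_, the port emits nothing there
def extractIntrons (placed : List (Char × List Char × Int)) : List (Int × Int) :=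
  placed.filterMap (fun q =>
    if q.1 = 'N' then (PySem.Int.ofChars? q.2.1).map (fun n => (q.2.2, q.2.2 + n - 1))
    else none)

def get_correct_intron_and_end_pos_alt (cigar_str : String) (start_coord : Int) : Int × (List (Int × Int)) :=
  let tokens := tokenizeB cigar_str.toList
  let ph := (PySem.List.enumerate tokens 0).foldl
    (bBody (PySem.List.len tokens - 1)) ([], start_coord)
  (ph.2, extractIntrons ph.1)

-- ===== PRECONDITION & SPEC =====
-- Pre_ excludes exactly the inputs where A raises ValueError (int('') on a CIGAR operator with
-- no digit count, i.e. a non-digit character at position 0 or right after another non-digit).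
def Pre_get_correct_intron_and_end_pos (cigar_str : String) (start_coord : Int) : Prop :=
  ∀ i, i < cigar_str.toList.length →
    PySem.Chars.isdigit (cigar_str.toList.getD i '0') = false →
    0 < i ∧ PySem.Chars.isdigit (cigar_str.toList.getD (i - 1) '0') = true
instance (cigar_str : String) (start_coord : Int) : Decidable (Pre_get_correct_intron_and_end_pos cigar_str start_coord) := by unfold Pre_get_correct_intron_and_end_pos; infer_instance
def pvWitness_get_correct_intron_and_end_pos : String × Int := ("5S10M2I30N4M3S", 100)

def Spec_get_correct_intron_and_end_pos (cigar_str : String) (start_coord : Int) (out : Int × (List (Int × Int))) : Prop := out = get_correct_intron_and_end_pos_alt cigar_str start_coord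
instance (cigar_str : String) (start_coord : Int) (out : Int × (List (Int × Int))) : Decidable (Spec_get_correct_intron_and_end_pos cigar_str start_coord out) := by unfold Spec_get_correct_intron_and_end_pos; infer_instance

-- ===== CLAIM (what is proved, stated in full; the proofs are below) =====
def Claim_equal_get_correct_intron_and_end_pos : Prop := ∀ (cigar_str : String) (start_coord : Int), Dom_get_correct_intron_and_end_pos cigar_str start_coord → Pre_get_correct_intron_and_end_pos cigar_str start_coord → Spec_get_correct_intron_and_end_pos cigar_str start_coord (get_correct_intron_and_end_pos cigar_str start_coord)

-- ===== LEMMAS AND PROOFS =====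

-- tokenizer equivalence: A's fused digit-accumulator scan equals B's peel-off scan
def tokAux (tmp : List Char) : List Char → List (Char × List Char)
  | [] => []
  | c :: cs => if PySem.Chars.isdigit c then tokAux (tmp ++ [c]) cs else (c, tmp) :: tokAux [] cs

theorem splitFold_eq_tokAux (cs : List Char) (acc : List (Char × List Char)) (tmp : List Char) :
    (cs.foldl
      (fun (st : List (Char × List Char) × List Char) elem =>
        if PySem.Chars.isdigit elem then (st.1, st.2 ++ [elem])
        else (st.1 ++ [(elem, st.2)], []))
      (acc, tmp)).1 = acc ++ tokAux tmp cs := by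
  induction cs generalizing acc tmp with
  | nil => simp [tokAux]
  | cons c cs ih =>
    simp only [List.foldl_cons, tokAux]
    by_cases h : PySem.Chars.isdigit c = true
    · simp [h, ih]
    · simp [h, ih]

theorem tokAux_peel (cs : List Char) (tmp : List Char) :
    tokAux tmp cs =
      match cs.dropWhile PySem.Chars.isdigit with
      | [] => []
      | op :: tl => (op, tmp ++ cs.takeWhile PySem.Chars.isdigit) :: tokAux [] tl := by
  induction cs generalizing tmp with
  | nil => simp [tokAux]
  | cons c cs ih =>
    by_cases h : PySem.Chars.isdigit c = true
    · simp only [tokAux, h, if_true, List.dropWhile_cons, List.takeWhile_cons, ih]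
      cases hd : cs.dropWhile PySem.Chars.isdigit <;> simp
    · simp [tokAux, h]

theorem tokAux_nil_eq_tokenizeB (cs : List Char) : tokAux [] cs = tokenizeB cs := by
  induction cs using tokenizeB.induct with
  | case1 cs hd => rw [tokAux_peel, tokenizeB]; split <;> split <;> simp_all
  | case2 cs op tl hd ih => rw [tokAux_peel, tokenizeB]; split <;> split <;> simp_all

theorem tok_eq (cs : List Char) : splitCigarA cs = tokenizeB cs := by
  unfold splitCigarA
  rw [splitFold_eq_tokAux, tokAux_nil_eq_tokenizeB]; simp

-- consumed length of one enumerated token (the common contribution of both loops)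
def cval (last : Int) (p : Int × (Char × List Char)) : Int :=
  if p.2.1 = 'I' ∨ (p.2.1 = 'S' ∧ (p.1 = 0 ∨ p.1 = last)) then 0
  else (PySem.Int.ofChars? p.2.2).getD 0

theorem aBody_fst (last s : Int) (st : Int × List (Int × Int)) (p : Int × (Char × List Char)) :
    (aBody last s st p).1 = st.1 + cval last p := by
  unfold aBody cval
  cases hn : PySem.Int.ofChars? p.2.2 <;> split_ifs <;> simp_all

theorem aBody_snd (last s : Int) (st : Int × List (Int × Int)) (p : Int × (Char × List Char)) :
    (aBody last s st p).2 = st.2 ++ extractIntrons [(p.2.1, p.2.2, s + st.1)] := by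
  unfold aBody extractIntrons
  cases hn : PySem.Int.ofChars? p.2.2 <;> split_ifs <;> simp_all

theorem bBody_fst (last : Int) (st : List (Char × List Char × Int) × Int) (p : Int × (Char × List Char)) :
    (bBody last st p).1 = st.1 ++ [(p.2.1, p.2.2, st.2)] := by
  unfold bBody; split_ifs <;> rfl

theorem bBody_snd (last : Int) (st : List (Char × List Char × Int) × Int) (p : Int × (Char × List Char)) :
    (bBody last st p).2 = st.2 + cval last p := by
  unfold bBody cval; split_ifs <;> simp_all

theorem afold_acc (last s : Int) (es : List (Int × (Char × List Char))) (k : Int)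
    (acc : List (Int × Int)) :
    es.foldl (aBody last s) (k, acc) =
      ((es.foldl (aBody last s) (k, [])).1, acc ++ (es.foldl (aBody last s) (k, [])).2) := by
  induction es generalizing k acc with
  | nil => simp
  | cons p es ih =>
    simp only [List.foldl_cons]
    have hstep : aBody last s (k, acc) p
        = ((aBody last s (k, ([] : List (Int × Int))) p).1,
           acc ++ (aBody last s (k, ([] : List (Int × Int))) p).2) := by
      rw [Prod.ext_iff]
      refine ⟨by rw [aBody_fst, aBody_fst], by rw [aBody_snd, aBody_snd]; simp⟩
    rw [hstep, ih, ih ((aBody last s (k, []) p).1) ((aBody last s (k, [])) p).2]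
    simp

theorem bfold_acc (last : Int) (es : List (Int × (Char × List Char)))
    (P : List (Char × List Char × Int)) (k : Int) :
    es.foldl (bBody last) (P, k) =
      (P ++ (es.foldl (bBody last) ([], k)).1, (es.foldl (bBody last) ([], k)).2) := by
  induction es generalizing P k with
  | nil => simp
  | cons p es ih =>
    simp only [List.foldl_cons]
    have hstep : bBody last (P, k) p
        = (P ++ (bBody last (([] : List (Char × List Char × Int)), k) p).1,
           (bBody last (([] : List (Char × List Char × Int)), k) p).2) := by
      rw [Prod.ext_iff]
      refine ⟨by rw [bBody_fst, bBody_fst]; simp, by rw [bBody_snd, bBody_snd]⟩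
    rw [hstep, ih, ih ((bBody last ([], k) p).1) ((bBody last ([], k) p).2)]
    simp

theorem extractIntrons_append (xs ys : List (Char × List Char × Int)) :
    extractIntrons (xs ++ ys) = extractIntrons xs ++ extractIntrons ys := by
  unfold extractIntrons; simp

theorem fold_main (last s : Int) (es : List (Int × (Char × List Char))) (k : Int) :
    (es.foldl (aBody last s) (k, [])).1 = (es.foldl (bBody last) ([], s + k)).2 - s
    ∧ (es.foldl (aBody last s) (k, [])).2
        = extractIntrons ((es.foldl (bBody last) ([], s + k)).1) := by
  induction es generalizing k with
  | nil => constructor <;> simp [extractIntrons]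
  | cons p es ih =>
    simp only [List.foldl_cons]
    have ha : aBody last s (k, ([] : List (Int × Int))) p
        = (k + cval last p, extractIntrons [(p.2.1, p.2.2, s + k)]) := by
      rw [Prod.ext_iff]
      refine ⟨by rw [aBody_fst], by rw [aBody_snd]; simp⟩
    have hb : bBody last (([] : List (Char × List Char × Int)), s + k) p
        = ([(p.2.1, p.2.2, s + k)], s + (k + cval last p)) := by
      rw [Prod.ext_iff]
      refine ⟨by rw [bBody_fst]; simp, by rw [bBody_snd]; ring⟩
    rw [ha, hb, afold_acc, bfold_acc]
    obtain ⟨ih1, ih2⟩ := ih (k + cval last p)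
    constructor
    · simpa using ih1
    · simp only [extractIntrons_append]
      simp [ih2]

theorem ports_agree (cigar_str : String) (start_coord : Int) :
    get_correct_intron_and_end_pos cigar_str start_coord
      = get_correct_intron_and_end_pos_alt cigar_str start_coord := by
  unfold get_correct_intron_and_end_pos get_correct_intron_and_end_pos_alt
  dsimp only
  rw [tok_eq]
  rw [PySem.List.enumerate_eq_map_pyRange (tokenizeB cigar_str.toList) ('?', ([] : List Char)),
      List.foldl_map]
  obtain ⟨h1, h2⟩ := fold_main (PySem.List.len (tokenizeB cigar_str.toList) - 1) start_coord
    ((PySem.List.pyRange 0 (PySem.List.len (tokenizeB cigar_str.toList)) 1).map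
      (fun j => (j, PySem.List.pyGetD (tokenizeB cigar_str.toList) j ('?', ([] : List Char))))) 0
  simp only [List.foldl_map] at h1 h2
  rw [add_zero] at h1 h2
  rw [Prod.ext_iff]
  exact ⟨by rw [h1]; ring, h2⟩

-- ===== VERDICT (by name: the statement is the Claim_ definition above) =====
theorem get_correct_intron_and_end_pos_spec : Claim_equal_get_correct_intron_and_end_pos := by
  intro cigar_str start_coord _ _
  unfold Spec_get_correct_intron_and_end_pos
  exact ports_agree cigar_str start_coord
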